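-- pv_equiv track=rewrite | github.com/ilanazim/Legal_Negligence_NLP_Research | code/key_functions.py | match_contains_words
-- ===== SOURCE A (Python) =====
-- def match_contains_words(match, words):
--     '''Helper function for rule based damage extraction.
--
--     Given some text. Find if the words are all present in the text.
--     If word begins with '!' the word cannot appear in the text, acts as a negation.
--     Can handle mix/matching of both types.
--
--     Example: ('!good', 'day') would match any string with the word "day" present and "good" NOT present.
--
--     Arguments:
--     match (String) - The text to look for words in
--     words (list) - List of words to check for. If word begins with ! (i.e. '!past'), then the word cannot appear in it
--
--     Returns:
--     True if all words are present (or not present if using !)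
--     False otherwise
--
--     '''
--     pos_words = []
--     neg_words = []
--     for word in words:
--         if word.startswith('!'):
--             neg_words.append(word[1:])
--         else:
--             pos_words.append(word)
--
--     if all(word in match for word in pos_words):
--         if all(word not in match for word in neg_words):
--             return True
--
--     return False
-- ===== SOURCE B (Python) =====
-- def match_contains_words(match, words):
--     '''Single pass with early return: fail fast on the first unsatisfied word.'''
--     for word in words:
--         if word.startswith('!'):
--             if word[1:] in match:
--                 return False
--         elif word not in match:
--             return False
--     return True
-- ===== Notes on version B (the rewrite author's own statement) =====
-- stated objective: simpler
-- what changed: Replaced the partition into pos/neg lists followed by two all() generator passes with a single short-circuiting loop over words that returns False at the first unsatisfied requirement; no intermediate lists or generators are built.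
import Mathlib
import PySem

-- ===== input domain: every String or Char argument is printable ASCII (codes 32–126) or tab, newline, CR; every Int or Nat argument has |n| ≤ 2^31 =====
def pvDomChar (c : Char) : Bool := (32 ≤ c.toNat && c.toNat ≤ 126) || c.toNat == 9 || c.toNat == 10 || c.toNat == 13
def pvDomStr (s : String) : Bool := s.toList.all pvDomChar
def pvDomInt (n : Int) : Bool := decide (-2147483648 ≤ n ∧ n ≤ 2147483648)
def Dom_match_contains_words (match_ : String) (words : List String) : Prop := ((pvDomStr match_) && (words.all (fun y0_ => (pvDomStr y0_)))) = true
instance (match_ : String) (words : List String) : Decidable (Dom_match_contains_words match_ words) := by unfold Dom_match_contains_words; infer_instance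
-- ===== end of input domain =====

-- B replaces A's partition-into-two-lists plus two all() passes with one
-- short-circuiting loop that returns early (objective: simpler).

-- ===== PORT A =====
def match_contains_words (match_ : String) (words : List String) : Bool :=
  let acc := words.foldl
    (fun (acc : List String × List String) word =>
      if PySem.Str.startswith word "!" then
        (acc.1, acc.2 ++ [PySem.Str.slice word (some 1) none])
      else
        (acc.1 ++ [word], acc.2))
    ([], [])
  if acc.1.all (fun word => PySem.Str.isIn word match_) then
    if acc.2.all (fun word => !(PySem.Str.isIn word match_)) then
      true
    else false
  else false

-- ===== PORT B =====
def matchAltGo (match_ : String) : List String → Bool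
  | [] => true
  | word :: rest =>
    if PySem.Str.startswith word "!" then
      if PySem.Str.isIn (PySem.Str.slice word (some 1) none) match_ then false
      else matchAltGo match_ rest
    else if !(PySem.Str.isIn word match_) then false
    else matchAltGo match_ rest

def match_contains_words_alt (match_ : String) (words : List String) : Bool :=
  matchAltGo match_ words

-- ===== PRECONDITION & SPEC =====
def Spec_match_contains_words (match_ : String) (words : List String) (out : Bool) : Prop := out = match_contains_words_alt match_ words
instance (match_ : String) (words : List String) (out : Bool) : Decidable (Spec_match_contains_words match_ words out) := by unfold Spec_match_contains_words; infer_instance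

-- ===== CLAIM (what is proved, stated in full; the proofs are below) =====
def Claim_equal_match_contains_words : Prop := ∀ (match_ : String) (words : List String), Dom_match_contains_words match_ words → Spec_match_contains_words match_ words (match_contains_words match_ words)

-- ===== LEMMAS AND PROOFS =====

def mcwPos (words : List String) : List String :=
  words.filter (fun w => !PySem.Str.startswith w "!")

def mcwNeg (words : List String) : List String :=
  (words.filter (fun w => PySem.Str.startswith w "!")).map
    (fun w => PySem.Str.slice w (some 1) none)

theorem mcw_fold_spec (words : List String) (p n : List String) :
    words.foldl
      (fun (acc : List String × List String) word =>
        if PySem.Str.startswith word "!" then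
          (acc.1, acc.2 ++ [PySem.Str.slice word (some 1) none])
        else
          (acc.1 ++ [word], acc.2))
      (p, n)
    = (p ++ mcwPos words, n ++ mcwNeg words) := by
  induction words generalizing p n with
  | nil => simp [mcwPos, mcwNeg]
  | cons w ws ih =>
    rw [List.foldl_cons]
    by_cases h : PySem.Str.startswith w "!" = true
    · rw [if_pos h, ih]
      simp [mcwPos, mcwNeg, List.filter_cons]
      simp [PySem.Str.startswith] at h
      simp [h]
    · rw [if_neg h, ih]
      simp [mcwPos, mcwNeg, List.filter_cons]
      simp [PySem.Str.startswith] at h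
      simp [h]

theorem mcw_alt_spec (match_ : String) (words : List String) :
    matchAltGo match_ words
      = ((mcwPos words).all (fun w => PySem.Str.isIn w match_)
          && (mcwNeg words).all (fun w => !(PySem.Str.isIn w match_))) := by
  induction words with
  | nil => simp [matchAltGo, mcwPos, mcwNeg]
  | cons w ws ih =>
    rw [matchAltGo]
    by_cases h : PySem.Str.startswith w "!" = true
    · rw [if_pos h, ih]
      have h' := h; simp [PySem.Str.startswith] at h'
      by_cases h2 : PySem.Str.isIn (PySem.Str.slice w (some 1) none) match_ = true
      · have h2' := h2; simp [PySem.Str.isIn] at h2'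
        simp [mcwPos, mcwNeg, h', h2']
      · have h2' := h2; simp [PySem.Str.isIn] at h2'
        simp [mcwPos, mcwNeg, h', h2']
    · rw [if_neg h, ih]
      have h' := h; simp [PySem.Str.startswith] at h'
      by_cases h2 : PySem.Str.isIn w match_ = true
      · have h2' := h2; simp [PySem.Str.isIn] at h2'
        simp [mcwPos, mcwNeg, h', h2']
      · have h2' := h2; simp [PySem.Str.isIn] at h2'
        simp [mcwPos, mcwNeg, h', h2']

-- ===== VERDICT (by name: the statement is the Claim_ definition above) =====
theorem match_contains_words_spec : Claim_equal_match_contains_words := by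
  intro match_ words _
  unfold Spec_match_contains_words match_contains_words match_contains_words_alt
  rw [mcw_fold_spec, mcw_alt_spec]
  rw [Bool.eq_iff_iff]; simp [List.all_eq_true]
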